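-- pv_equiv track=rewrite | github.com/hungphanquocviet/advent-of-code-2024 | day10/day10a.py | search
-- ===== SOURCE A (Python) =====
-- def search(grid, i, j, curr, visited):
--     if i < 0 or i >= len(grid) or j < 0 or j >= len(grid[0]):
--         return 0
--     if (visited[i][j] or grid[i][j] - curr != 1):
--         return 0
--
--     visited[i][j] = True
--     if (grid[i][j] == 9):
--         return 1
--
--     dirs = [[1, 0], [0, 1], [-1, 0], [0, -1]]
--     ans = 0
--     for d in dirs:
--         ans += search(grid, i + d[0], j + d[1], grid[i][j], visited)
--
--     return ans
-- ===== SOURCE B (Python) =====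
-- def search(grid, i, j, curr, visited):
--     # Iterative DFS with an explicit stack instead of recursion.
--     stack = [(i, j, curr)]
--     ans = 0
--     while stack:
--         i, j, c = stack.pop()
--         if i < 0 or i >= len(grid) or j < 0 or j >= len(grid[0]):
--             continue
--         if visited[i][j] or grid[i][j] - c != 1:
--             continue
--         visited[i][j] = True
--         if grid[i][j] == 9:
--             ans += 1
--         else:
--             g = grid[i][j]
--             stack.extend([(i, j - 1, g), (i - 1, j, g), (i, j + 1, g), (i + 1, j, g)])
--     return ans
-- ===== Notes on version B (the rewrite author's own statement) =====
-- stated objective: alternative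
-- what changed: The recursive DFS is replaced by an iterative loop over an explicit stack of (i, j, curr) triples; neighbors are pushed in reverse so the exploration order, count and visited mutations match A exactly.
-- outside the precondition, e.g. on search([[2, 3]], 0, 0, 1, [[True]]): A returns 0, B returns 0
import Mathlib
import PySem

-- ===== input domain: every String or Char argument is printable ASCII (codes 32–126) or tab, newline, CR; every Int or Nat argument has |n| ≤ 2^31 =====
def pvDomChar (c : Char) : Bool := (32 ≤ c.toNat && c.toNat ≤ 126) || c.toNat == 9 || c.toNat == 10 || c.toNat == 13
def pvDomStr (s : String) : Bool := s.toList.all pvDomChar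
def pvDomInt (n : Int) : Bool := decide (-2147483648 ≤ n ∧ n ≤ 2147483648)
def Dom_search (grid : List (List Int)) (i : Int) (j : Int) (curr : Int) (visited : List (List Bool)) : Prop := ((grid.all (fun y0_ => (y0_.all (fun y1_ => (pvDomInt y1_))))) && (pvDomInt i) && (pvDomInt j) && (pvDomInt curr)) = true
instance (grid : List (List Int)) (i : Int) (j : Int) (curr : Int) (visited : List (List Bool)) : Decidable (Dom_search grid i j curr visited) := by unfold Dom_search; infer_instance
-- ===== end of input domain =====

-- B replaces A's recursive DFS by an iterative explicit-stack loop (same exploration order);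
-- the equivalence is about the RETURN value (both Pythons mutate `visited` identically).

-- number of unvisited cells: fuel bound for both ports (pure recursion scaffolding;
-- on Pre_ the fuel is always sufficient, since every level of A's recursion / every
-- iteration of B's loop marks one more cell or pops one triple)
def pvMu (v : List (List Bool)) : Nat := (v.map (fun r => r.count false)).sum

-- ===== PORT A =====
-- literal transliteration of A's recursive DFS; the in-place mutation of `visited`
-- is threaded as state, and only the return value (.1) is the function's result.
def searchAux (grid : List (List Int)) : Nat → Int → Int → Int → List (List Bool) → Int × List (List Bool)
  | 0, _, _, _, visited => (0, visited)
  | fuel+1, i, j, curr, visited =>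
    if i < 0 ∨ (grid.length : Int) ≤ i ∨ j < 0 ∨ ((grid.headD []).length : Int) ≤ j then (0, visited)
    else
      if ((visited.getD i.toNat []).getD j.toNat false) = true ∨
          (grid.getD i.toNat []).getD j.toNat 0 - curr ≠ 1 then (0, visited)
      else
        let v' := visited.set i.toNat ((visited.getD i.toNat []).set j.toNat true)
        if (grid.getD i.toNat []).getD j.toNat 0 = 9 then (1, v')
        else
          ([((1:Int),(0:Int)), (0,1), (-1,0), (0,-1)]).foldl
            (fun acc d =>
              let r := searchAux grid fuel (i + d.1) (j + d.2) ((grid.getD i.toNat []).getD j.toNat 0) acc.2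
              (acc.1 + r.1, r.2)) (0, v')

def search (grid : List (List Int)) (i : Int) (j : Int) (curr : Int) (visited : List (List Bool)) : Int :=
  (searchAux grid (pvMu visited + 1) i j curr visited).1

-- ===== PORT B =====
-- Source B's explicit-stack loop; head of the list is the top of the Python stack
-- (neighbors are pushed so that (i+1, j) is popped first, as in Source B).
def loopB (grid : List (List Int)) : Nat → List (Int × Int × Int) → List (List Bool) → Int → Int
  | _, [], _, ans => ans
  | 0, _ :: _, _, ans => ans
  | fuel+1, (i, j, c) :: rest, visited, ans =>
    if i < 0 ∨ (grid.length : Int) ≤ i ∨ j < 0 ∨ ((grid.headD []).length : Int) ≤ j then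
      loopB grid fuel rest visited ans
    else
      if ((visited.getD i.toNat []).getD j.toNat false) = true ∨
          (grid.getD i.toNat []).getD j.toNat 0 - c ≠ 1 then
        loopB grid fuel rest visited ans
      else
        let v' := visited.set i.toNat ((visited.getD i.toNat []).set j.toNat true)
        if (grid.getD i.toNat []).getD j.toNat 0 = 9 then loopB grid fuel rest v' (ans + 1)
        else
          loopB grid fuel
            ((i + 1, j, (grid.getD i.toNat []).getD j.toNat 0) ::
             (i, j + 1, (grid.getD i.toNat []).getD j.toNat 0) ::
             (i - 1, j, (grid.getD i.toNat []).getD j.toNat 0) ::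
             (i, j - 1, (grid.getD i.toNat []).getD j.toNat 0) :: rest) v' ans

def search_alt (grid : List (List Int)) (i : Int) (j : Int) (curr : Int) (visited : List (List Bool)) : Int :=
  loopB grid (5 * pvMu visited + 1) [(i, j, curr)] visited 0

-- ===== PRECONDITION & SPEC =====
-- Pre_ excludes ragged grids / mismatched visited shapes (unless the start cell is out of
-- bounds, where A returns 0 before any access): on those A may raise IndexError mid-search,
-- and whether it does depends on the DFS path, not on a closed-form shape condition.
def Pre_search (grid : List (List Int)) (i : Int) (j : Int) (curr : Int) (visited : List (List Bool)) : Prop :=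
  (i < 0 ∨ (grid.length : Int) ≤ i ∨ j < 0 ∨ ((grid.headD []).length : Int) ≤ j) ∨
  (visited.length = grid.length ∧ (∀ r ∈ grid, r.length = (grid.headD []).length) ∧
   (∀ r ∈ visited, r.length = (grid.headD []).length))
instance (grid : List (List Int)) (i : Int) (j : Int) (curr : Int) (visited : List (List Bool)) : Decidable (Pre_search grid i j curr visited) := by unfold Pre_search; infer_instance

def pvWitness_search : List (List Int) × Int × Int × Int × List (List Bool) :=
  ([[1, 9]], 0, 0, 0, [[false, false]])

def Spec_search (grid : List (List Int)) (i : Int) (j : Int) (curr : Int) (visited : List (List Bool)) (out : Int) : Prop := out = search_alt grid i j curr visited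
instance (grid : List (List Int)) (i : Int) (j : Int) (curr : Int) (visited : List (List Bool)) (out : Int) : Decidable (Spec_search grid i j curr visited out) := by unfold Spec_search; infer_instance

-- ===== CLAIM (what is proved, stated in full; the proofs are below) =====
def Claim_equal_search : Prop := ∀ (grid : List (List Int)) (i : Int) (j : Int) (curr : Int) (visited : List (List Bool)), Dom_search grid i j curr visited → Pre_search grid i j curr visited → Spec_search grid i j curr visited (search grid i j curr visited)

-- ===== LEMMAS AND PROOFS =====

-- the rectangular-shape part of Pre_
def Rect (g : List (List Int)) (v : List (List Bool)) : Prop :=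
  v.length = g.length ∧ (∀ r ∈ g, r.length = (g.headD []).length) ∧
  (∀ r ∈ v, r.length = (g.headD []).length)

-- A-side composition of searchAux over a stack of pending calls (proof-side bridge)
def runA (g : List (List Int)) : List (Int × Int × Int) → List (List Bool) → Int × List (List Bool)
  | [], v => (0, v)
  | (i, j, c) :: s, v =>
      ((searchAux g (pvMu v + 1) i j c v).1 +
         (runA g s (searchAux g (pvMu v + 1) i j c v).2).1,
       (runA g s (searchAux g (pvMu v + 1) i j c v).2).2)

-- canonical one-step unfolding of searchAux (the foldl over the four direction
-- vectors written out, arithmetic like j+0 normalized)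
theorem searchAux_succ (g : List (List Int)) (F : Nat) (i j c : Int) (v : List (List Bool)) :
    searchAux g (F + 1) i j c v =
      if (i < 0 ∨ (g.length : Int) ≤ i ∨ j < 0 ∨ ((g.headD []).length : Int) ≤ j) then (0, v)
      else if (((v.getD i.toNat []).getD j.toNat false) = true ∨ (g.getD i.toNat []).getD j.toNat 0 - c ≠ 1) then (0, v)
      else if ((g.getD i.toNat []).getD j.toNat 0 = 9) then (1, (v.set i.toNat ((v.getD i.toNat []).set j.toNat true)))
      else ((searchAux g F (i + 1) j ((g.getD i.toNat []).getD j.toNat 0) (v.set i.toNat ((v.getD i.toNat []).set j.toNat true))).1 + (searchAux g F i (j + 1) ((g.getD i.toNat []).getD j.toNat 0) (searchAux g F (i + 1) j ((g.getD i.toNat []).getD j.toNat 0) (v.set i.toNat ((v.getD i.toNat []).set j.toNat true))).2).1 + (searchAux g F (i - 1) j ((g.getD i.toNat []).getD j.toNat 0) (searchAux g F i (j + 1) ((g.getD i.toNat []).getD j.toNat 0) (searchAux g F (i + 1) j ((g.getD i.toNat []).getD j.toNat 0) (v.set i.toNat ((v.getD i.toNat []).set j.toNat true))).2).2).1 + (searchAux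 g F i (j - 1) ((g.getD i.toNat []).getD j.toNat 0) (searchAux g F (i - 1) j ((g.getD i.toNat []).getD j.toNat 0) (searchAux g F i (j + 1) ((g.getD i.toNat []).getD j.toNat 0) (searchAux g F (i + 1) j ((g.getD i.toNat []).getD j.toNat 0) (v.set i.toNat ((v.getD i.toNat []).set j.toNat true))).2).2).2).1, (searchAux g F i (j - 1) ((g.getD i.toNat []).getD j.toNat 0) (searchAux g F (i - 1) j ((g.getD i.toNat []).getD j.toNat 0) (searchAux g F i (j + 1) ((g.getD i.toNat []).getD j.toNat 0) (searchAux g F (i + 1) j ((g.getD i.toNat []).getD j.toNat 0) (v.set i.toNat ((v.getD i.toNat []).set j.toNat true))).2).2).2).2) := by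
  show (if (i < 0 ∨ (g.length : Int) ≤ i ∨ j < 0 ∨ ((g.headD []).length : Int) ≤ j) then (0, v)
      else
        if (((v.getD i.toNat []).getD j.toNat false) = true ∨ (g.getD i.toNat []).getD j.toNat 0 - c ≠ 1) then (0, v)
        else
          if ((g.getD i.toNat []).getD j.toNat 0 = 9) then (1, (v.set i.toNat ((v.getD i.toNat []).set j.toNat true)))
          else ([((1:Int),(0:Int)), (0,1), (-1,0), (0,-1)]).foldl
            (fun acc d =>
              let r := searchAux g F (i + d.1) (j + d.2) ((g.getD i.toNat []).getD j.toNat 0) acc.2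
              (acc.1 + r.1, r.2)) (0, (v.set i.toNat ((v.getD i.toNat []).set j.toNat true)))) = _
  simp only [List.foldl_cons, List.foldl_nil, add_zero, zero_add, ← sub_eq_add_neg]

theorem loopB_succ (g : List (List Int)) (F : Nat) (i j c : Int)
    (rest : List (Int × Int × Int)) (v : List (List Bool)) (ans : Int) :
    loopB g (F + 1) ((i, j, c) :: rest) v ans =
      if (i < 0 ∨ (g.length : Int) ≤ i ∨ j < 0 ∨ ((g.headD []).length : Int) ≤ j) then loopB g F rest v ans
      else if (((v.getD i.toNat []).getD j.toNat false) = true ∨ (g.getD i.toNat []).getD j.toNat 0 - c ≠ 1) then loopB g F rest v ans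
      else if ((g.getD i.toNat []).getD j.toNat 0 = 9) then loopB g F rest (v.set i.toNat ((v.getD i.toNat []).set j.toNat true)) (ans + 1)
      else loopB g F (((i + 1), j, ((g.getD i.toNat []).getD j.toNat 0)) :: (i, (j + 1), ((g.getD i.toNat []).getD j.toNat 0)) :: ((i - 1), j, ((g.getD i.toNat []).getD j.toNat 0)) :: (i, (j - 1), ((g.getD i.toNat []).getD j.toNat 0)) :: rest) (v.set i.toNat ((v.getD i.toNat []).set j.toNat true)) ans := by
  rfl

theorem runA_cons (g : List (List Int)) (i j c : Int) (s : List (Int × Int × Int))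
    (v : List (List Bool)) :
    runA g ((i, j, c) :: s) v =
      ((searchAux g (pvMu v + 1) i j c v).1 +
         (runA g s (searchAux g (pvMu v + 1) i j c v).2).1,
       (runA g s (searchAux g (pvMu v + 1) i j c v).2).2) := by
  rfl

theorem sum_zero_mem (l : List Nat) (h : l.sum = 0) (x : Nat) (hx : x ∈ l) : x = 0 := by
  induction l with
  | nil => simp at hx
  | cons a t ih =>
    simp only [List.sum_cons] at h
    rcases List.mem_cons.mp hx with rfl | hx
    · omega
    · exact ih (by omega) hx

theorem getD_mem {α : Type} (l : List α) (n : Nat) (d : α) (h : n < l.length) : l.getD n d ∈ l := by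
  induction l generalizing n with
  | nil => simp at h
  | cons a t ih =>
    cases n with
    | zero => simp
    | succ m =>
      simp only [List.getD_cons_succ]
      exact List.mem_cons_of_mem _ (ih m (by simpa using h))

theorem set_oob {α : Type} (l : List α) (n : Nat) (a : α) (h : l.length ≤ n) : l.set n a = l := by
  induction l generalizing n with
  | nil => simp
  | cons b t ih =>
    cases n with
    | zero => simp at h
    | succ m => simp only [List.set_cons_succ]; rw [ih m (by simpa using h)]

theorem mem_set_elim {α : Type} (l : List α) (n : Nat) (a x : α) (h : x ∈ l.set n a) :
    x = a ∨ x ∈ l := by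
  induction l generalizing n with
  | nil => simp at h
  | cons b t ih =>
    cases n with
    | zero =>
      rcases List.mem_cons.mp h with h | h
      · exact Or.inl h
      · exact Or.inr (List.mem_cons_of_mem _ h)
    | succ m =>
      rcases List.mem_cons.mp h with h | h
      · exact Or.inr (by simp [h])
      · rcases ih m h with h | h
        · exact Or.inl h
        · exact Or.inr (List.mem_cons_of_mem _ h)

theorem count_set_le (row : List Bool) (j : Nat) :
    (row.set j true).count false ≤ row.count false := by
  induction row generalizing j with
  | nil => simp
  | cons a t ih =>
    cases j with
    | zero => cases a <;> simp [List.count_cons]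
    | succ n =>
      have := ih n
      simp only [List.set_cons_succ, List.count_cons]
      omega

theorem count_set_lt (row : List Bool) (j : Nat) (hj : j < row.length)
    (hf : row.getD j false = false) :
    (row.set j true).count false < row.count false := by
  induction row generalizing j with
  | nil => simp at hj
  | cons a t ih =>
    cases j with
    | zero =>
      simp only [List.getD_cons_zero] at hf
      subst hf
      simp [List.count_cons]
    | succ n =>
      simp only [List.getD_cons_succ] at hf
      simp only [List.length_cons] at hj
      have := ih n (by omega) hf
      simp only [List.set_cons_succ, List.count_cons]
      omega

theorem mu_set_le (v : List (List Bool)) (i j : Nat) :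
    pvMu (v.set i ((v.getD i []).set j true)) ≤ pvMu v := by
  induction v generalizing i with
  | nil => simp
  | cons a t ih =>
    cases i with
    | zero =>
      have := count_set_le a j
      simp only [List.set_cons_zero, List.getD_cons_zero, pvMu, List.map_cons, List.sum_cons]
      omega
    | succ n =>
      have := ih n
      simp only [List.set_cons_succ, List.getD_cons_succ, pvMu, List.map_cons, List.sum_cons] at *
      omega

theorem mu_set_lt (v : List (List Bool)) (i j : Nat) (hi : i < v.length)
    (hj : j < (v.getD i []).length) (hf : (v.getD i []).getD j false = false) :
    pvMu (v.set i ((v.getD i []).set j true)) < pvMu v := by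
  induction v generalizing i with
  | nil => simp at hi
  | cons a t ih =>
    cases i with
    | zero =>
      simp only [List.getD_cons_zero] at hj hf
      have := count_set_lt a j hj hf
      simp only [List.set_cons_zero, List.getD_cons_zero, pvMu, List.map_cons, List.sum_cons]
      omega
    | succ n =>
      simp only [List.getD_cons_succ] at hj hf
      simp only [List.length_cons] at hi
      have := ih n (by omega) hj hf
      simp only [List.set_cons_succ, List.getD_cons_succ, pvMu, List.map_cons, List.sum_cons] at *
      omega

theorem rect_set (g : List (List Int)) (v : List (List Bool)) (i j : Nat) (h : Rect g v) :
    Rect g (v.set i ((v.getD i []).set j true)) := by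
  obtain ⟨h1, h2, h3⟩ := h
  refine ⟨by simpa using h1, h2, ?_⟩
  intro r hr
  by_cases hi : i < v.length
  · rcases mem_set_elim _ _ _ _ hr with rfl | hr'
    · rw [List.length_set]
      exact h3 _ (getD_mem v i [] hi)
    · exact h3 _ hr'
  · rw [set_oob v i _ (by omega)] at hr
    exact h3 _ hr

theorem mu_zero_all_true (v : List (List Bool)) (i j : Nat) (h : pvMu v = 0)
    (hi : i < v.length) (hj : j < (v.getD i []).length) :
    (v.getD i []).getD j false = true := by
  have hcount : (v.getD i []).count false = 0 :=
    sum_zero_mem _ h _ (List.mem_map_of_mem (getD_mem v i [] hi))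
  have hnf : false ∉ v.getD i [] := List.count_eq_zero.mp hcount
  have hmem2 : (v.getD i []).getD j false ∈ v.getD i [] := getD_mem _ j false hj
  cases hb : (v.getD i []).getD j false with
  | false => exact absurd (hb ▸ hmem2) hnf
  | true => rfl

-- in-bounds indices from Rect plus the negated bounds check
theorem inb (g : List (List Int)) (v : List (List Bool)) (i j : Int) (hrect : Rect g v)
    (h1 : ¬(i < 0 ∨ (g.length : Int) ≤ i ∨ j < 0 ∨ ((g.headD []).length : Int) ≤ j)) : i.toNat < v.length ∧ j.toNat < (v.getD i.toNat []).length := by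
  push_neg at h1
  obtain ⟨a1, a2, a3, a4⟩ := h1
  have hiN : i.toNat < v.length := by rw [hrect.1]; omega
  refine ⟨hiN, ?_⟩
  have hw := hrect.2.2 (v.getD i.toNat []) (getD_mem v i.toNat [] hiN)
  omega

theorem searchAux_mono (g : List (List Int)) :
    ∀ F i j c v, pvMu (searchAux g F i j c v).2 ≤ pvMu v ∧
      (Rect g v → Rect g (searchAux g F i j c v).2) := by
  intro F
  induction F with
  | zero => intro i j c v; exact ⟨by simp [searchAux], fun h => by simpa [searchAux] using h⟩
  | succ F ih =>
    intro i j c v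
    rw [searchAux_succ]
    split_ifs with h1 h2 h9
    · exact ⟨le_rfl, fun h => h⟩
    · exact ⟨le_rfl, fun h => h⟩
    · exact ⟨mu_set_le v i.toNat j.toNat, fun h => rect_set g v i.toNat j.toNat h⟩
    · have t1 := ih (i + 1) j ((g.getD i.toNat []).getD j.toNat 0) (v.set i.toNat ((v.getD i.toNat []).set j.toNat true))
      have t2 := ih i (j + 1) ((g.getD i.toNat []).getD j.toNat 0) (searchAux g F (i + 1) j ((g.getD i.toNat []).getD j.toNat 0) (v.set i.toNat ((v.getD i.toNat []).set j.toNat true))).2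
      have t3 := ih (i - 1) j ((g.getD i.toNat []).getD j.toNat 0) (searchAux g F i (j + 1) ((g.getD i.toNat []).getD j.toNat 0) (searchAux g F (i + 1) j ((g.getD i.toNat []).getD j.toNat 0) (v.set i.toNat ((v.getD i.toNat []).set j.toNat true))).2).2
      have t4 := ih i (j - 1) ((g.getD i.toNat []).getD j.toNat 0) (searchAux g F (i - 1) j ((g.getD i.toNat []).getD j.toNat 0) (searchAux g F i (j + 1) ((g.getD i.toNat []).getD j.toNat 0) (searchAux g F (i + 1) j ((g.getD i.toNat []).getD j.toNat 0) (v.set i.toNat ((v.getD i.toNat []).set j.toNat true))).2).2).2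
      refine ⟨?_, ?_⟩
      · exact le_trans t4.1 (le_trans t3.1 (le_trans t2.1 (le_trans t1.1
          (mu_set_le v i.toNat j.toNat))))
      · exact fun h => t4.2 (t3.2 (t2.2 (t1.2 (rect_set g v i.toNat j.toNat h))))

theorem searchAux_fi (g : List (List Int)) :
    ∀ N F1 F2 i j c v, Rect g v → pvMu v ≤ N → pvMu v < F1 → pvMu v < F2 →
      searchAux g F1 i j c v = searchAux g F2 i j c v := by
  intro N
  induction N with
  | zero =>
    intro F1 F2 i j c v hrect hN h1 h2
    cases F1 with
    | zero => omega
    | succ a =>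
      cases F2 with
      | zero => omega
      | succ b =>
        rw [searchAux_succ, searchAux_succ]
        split_ifs with hC1 hC2 hC9
        · rfl
        · rfl
        · rfl
        · obtain ⟨hiN, hjN⟩ := inb g v i j hrect hC1
          exact absurd (Or.inl (mu_zero_all_true v i.toNat j.toNat (Nat.le_zero.mp hN) hiN hjN)) hC2
  | succ N ih =>
    intro F1 F2 i j c v hrect hN h1 h2
    cases F1 with
    | zero => omega
    | succ a =>
      cases F2 with
      | zero => omega
      | succ b =>
        rw [searchAux_succ, searchAux_succ]
        split_ifs with hC1 hC2 hC9
        · rfl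
        · rfl
        · rfl
        · obtain ⟨hiN, hjN⟩ := inb g v i j hrect hC1
          have hfalse : (v.getD i.toNat []).getD j.toNat false = false := by
            cases hX : (v.getD i.toNat []).getD j.toNat false with
            | false => rfl
            | true => exact absurd (Or.inl hX) hC2
          have hrect' := rect_set g v i.toNat j.toNat hrect
          have hlt := mu_set_lt v i.toNat j.toNat hiN hjN hfalse
          have e1 : (searchAux g a (i + 1) j ((g.getD i.toNat []).getD j.toNat 0) (v.set i.toNat ((v.getD i.toNat []).set j.toNat true))) = (searchAux g b (i + 1) j ((g.getD i.toNat []).getD j.toNat 0) (v.set i.toNat ((v.getD i.toNat []).set j.toNat true))) :=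
            ih a b (i + 1) j ((g.getD i.toNat []).getD j.toNat 0) (v.set i.toNat ((v.getD i.toNat []).set j.toNat true)) hrect' (by omega) (by omega) (by omega)
          rw [e1]
          have m1 := (searchAux_mono g b (i + 1) j ((g.getD i.toNat []).getD j.toNat 0) (v.set i.toNat ((v.getD i.toNat []).set j.toNat true))).1
          have r1 := (searchAux_mono g b (i + 1) j ((g.getD i.toNat []).getD j.toNat 0) (v.set i.toNat ((v.getD i.toNat []).set j.toNat true))).2 hrect'
          have e2 : searchAux g a i (j + 1) ((g.getD i.toNat []).getD j.toNat 0) (searchAux g b (i + 1) j ((g.getD i.toNat []).getD j.toNat 0) (v.set i.toNat ((v.getD i.toNat []).set j.toNat true))).2 = (searchAux g b i (j + 1) ((g.getD i.toNat []).getD j.toNat 0) (searchAux g b (i + 1) j ((g.getD i.toNat []).getD j.toNat 0) (v.set i.toNat ((v.getD i.toNat []).set j.toNat true))).2) :=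
            ih a b i (j + 1) ((g.getD i.toNat []).getD j.toNat 0) (searchAux g b (i + 1) j ((g.getD i.toNat []).getD j.toNat 0) (v.set i.toNat ((v.getD i.toNat []).set j.toNat true))).2 r1 (by omega) (by omega) (by omega)
          rw [e2]
          have m2 := (searchAux_mono g b i (j + 1) ((g.getD i.toNat []).getD j.toNat 0) (searchAux g b (i + 1) j ((g.getD i.toNat []).getD j.toNat 0) (v.set i.toNat ((v.getD i.toNat []).set j.toNat true))).2).1
          have r2 := (searchAux_mono g b i (j + 1) ((g.getD i.toNat []).getD j.toNat 0) (searchAux g b (i + 1) j ((g.getD i.toNat []).getD j.toNat 0) (v.set i.toNat ((v.getD i.toNat []).set j.toNat true))).2).2 r1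
          have e3 : searchAux g a (i - 1) j ((g.getD i.toNat []).getD j.toNat 0) (searchAux g b i (j + 1) ((g.getD i.toNat []).getD j.toNat 0) (searchAux g b (i + 1) j ((g.getD i.toNat []).getD j.toNat 0) (v.set i.toNat ((v.getD i.toNat []).set j.toNat true))).2).2 = (searchAux g b (i - 1) j ((g.getD i.toNat []).getD j.toNat 0) (searchAux g b i (j + 1) ((g.getD i.toNat []).getD j.toNat 0) (searchAux g b (i + 1) j ((g.getD i.toNat []).getD j.toNat 0) (v.set i.toNat ((v.getD i.toNat []).set j.toNat true))).2).2) :=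
            ih a b (i - 1) j ((g.getD i.toNat []).getD j.toNat 0) (searchAux g b i (j + 1) ((g.getD i.toNat []).getD j.toNat 0) (searchAux g b (i + 1) j ((g.getD i.toNat []).getD j.toNat 0) (v.set i.toNat ((v.getD i.toNat []).set j.toNat true))).2).2 r2 (by omega) (by omega) (by omega)
          rw [e3]
          have m3 := (searchAux_mono g b (i - 1) j ((g.getD i.toNat []).getD j.toNat 0) (searchAux g b i (j + 1) ((g.getD i.toNat []).getD j.toNat 0) (searchAux g b (i + 1) j ((g.getD i.toNat []).getD j.toNat 0) (v.set i.toNat ((v.getD i.toNat []).set j.toNat true))).2).2).1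
          have r3 := (searchAux_mono g b (i - 1) j ((g.getD i.toNat []).getD j.toNat 0) (searchAux g b i (j + 1) ((g.getD i.toNat []).getD j.toNat 0) (searchAux g b (i + 1) j ((g.getD i.toNat []).getD j.toNat 0) (v.set i.toNat ((v.getD i.toNat []).set j.toNat true))).2).2).2 r2
          have e4 : searchAux g a i (j - 1) ((g.getD i.toNat []).getD j.toNat 0) (searchAux g b (i - 1) j ((g.getD i.toNat []).getD j.toNat 0) (searchAux g b i (j + 1) ((g.getD i.toNat []).getD j.toNat 0) (searchAux g b (i + 1) j ((g.getD i.toNat []).getD j.toNat 0) (v.set i.toNat ((v.getD i.toNat []).set j.toNat true))).2).2).2 = (searchAux g b i (j - 1) ((g.getD i.toNat []).getD j.toNat 0) (searchAux g b (i - 1) j ((g.getD i.toNat []).getD j.toNat 0) (searchAux g b i (j + 1) ((g.getD i.toNat []).getD j.toNat 0) (searchAux g b (i + 1) j ((g.getD i.toNat []).getD j.toNat 0) (v.set i.toNat ((v.getD i.toNat []).set j.toNat true))).2).2).2) :=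
            ih a b i (j - 1) ((g.getD i.toNat []).getD j.toNat 0) (searchAux g b (i - 1) j ((g.getD i.toNat []).getD j.toNat 0) (searchAux g b i (j + 1) ((g.getD i.toNat []).getD j.toNat 0) (searchAux g b (i + 1) j ((g.getD i.toNat []).getD j.toNat 0) (v.set i.toNat ((v.getD i.toNat []).set j.toNat true))).2).2).2 r3 (by omega) (by omega) (by omega)
          rw [e4]

theorem loopB_runA (g : List (List Int)) :
    ∀ FB s v ans, Rect g v → 5 * pvMu v + s.length ≤ FB →
      loopB g FB s v ans = ans + (runA g s v).1 := by
  intro FB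
  induction FB with
  | zero =>
    intro s v ans hrect hle
    cases s with
    | nil => simp [loopB, runA]
    | cons t s' => simp only [List.length_cons] at hle; omega
  | succ F ihF =>
    intro s v ans hrect hle
    cases s with
    | nil => simp [loopB, runA]
    | cons t s' =>
      obtain ⟨i, j, c⟩ := t
      rw [loopB_succ, runA_cons, searchAux_succ]
      simp only [List.length_cons] at hle
      split_ifs with h1 h2 h9
      · rw [ihF s' v ans hrect (by omega)]
        simp
      · rw [ihF s' v ans hrect (by omega)]
        simp
      · obtain ⟨hiN, hjN⟩ := inb g v i j hrect h1
        have hfalse : (v.getD i.toNat []).getD j.toNat false = false := by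
          cases hX : (v.getD i.toNat []).getD j.toNat false with
          | false => rfl
          | true => exact absurd (Or.inl hX) h2
        have hrect' := rect_set g v i.toNat j.toNat hrect
        have hlt := mu_set_lt v i.toNat j.toNat hiN hjN hfalse
        rw [ihF s' (v.set i.toNat ((v.getD i.toNat []).set j.toNat true)) (ans + 1) hrect' (by omega)]
        show ans + 1 + (runA g s' (v.set i.toNat ((v.getD i.toNat []).set j.toNat true))).1 = ans + ((1:Int) + (runA g s' (v.set i.toNat ((v.getD i.toNat []).set j.toNat true))).1)
        ring
      · obtain ⟨hiN, hjN⟩ := inb g v i j hrect h1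
        have hfalse : (v.getD i.toNat []).getD j.toNat false = false := by
          cases hX : (v.getD i.toNat []).getD j.toNat false with
          | false => rfl
          | true => exact absurd (Or.inl hX) h2
        have hrect' := rect_set g v i.toNat j.toNat hrect
        have hlt := mu_set_lt v i.toNat j.toNat hiN hjN hfalse
        rw [ihF _ (v.set i.toNat ((v.getD i.toNat []).set j.toNat true)) ans hrect' (by simp only [List.length_cons]; omega)]
        simp only [runA_cons]
        have e1 : searchAux g (pvMu (v.set i.toNat ((v.getD i.toNat []).set j.toNat true)) + 1) (i + 1) j ((g.getD i.toNat []).getD j.toNat 0) (v.set i.toNat ((v.getD i.toNat []).set j.toNat true)) = (searchAux g (pvMu v) (i + 1) j ((g.getD i.toNat []).getD j.toNat 0) (v.set i.toNat ((v.getD i.toNat []).set j.toNat true))) :=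
          searchAux_fi g (pvMu (v.set i.toNat ((v.getD i.toNat []).set j.toNat true))) _ _ _ _ _ _ hrect' le_rfl (by omega) (by omega)
        rw [e1]
        have m1 := (searchAux_mono g (pvMu v) (i + 1) j ((g.getD i.toNat []).getD j.toNat 0) (v.set i.toNat ((v.getD i.toNat []).set j.toNat true))).1
        have r1 := (searchAux_mono g (pvMu v) (i + 1) j ((g.getD i.toNat []).getD j.toNat 0) (v.set i.toNat ((v.getD i.toNat []).set j.toNat true))).2 hrect'
        have e2 : searchAux g (pvMu (searchAux g (pvMu v) (i + 1) j ((g.getD i.toNat []).getD j.toNat 0) (v.set i.toNat ((v.getD i.toNat []).set j.toNat true))).2 + 1) i (j + 1) ((g.getD i.toNat []).getD j.toNat 0) (searchAux g (pvMu v) (i + 1) j ((g.getD i.toNat []).getD j.toNat 0) (v.set i.toNat ((v.getD i.toNat []).set j.toNat true))).2 = (searchAux g (pvMu v) i (j + 1) ((g.getD i.toNat []).getD j.toNat 0) (searchAux g (pvMu v) (i + 1) j ((g.getD i.toNat []).getD j.toNat 0) (v.set i.toNat ((v.getD i.toNat []).set j.toNat true))).2) :=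
          searchAux_fi g (pvMu (searchAux g (pvMu v) (i + 1) j ((g.getD i.toNat []).getD j.toNat 0) (v.set i.toNat ((v.getD i.toNat []).set j.toNat true))).2) _ _ _ _ _ _ r1 le_rfl (by omega) (by omega)
        rw [e2]
        have m2 := (searchAux_mono g (pvMu v) i (j + 1) ((g.getD i.toNat []).getD j.toNat 0) (searchAux g (pvMu v) (i + 1) j ((g.getD i.toNat []).getD j.toNat 0) (v.set i.toNat ((v.getD i.toNat []).set j.toNat true))).2).1
        have r2 := (searchAux_mono g (pvMu v) i (j + 1) ((g.getD i.toNat []).getD j.toNat 0) (searchAux g (pvMu v) (i + 1) j ((g.getD i.toNat []).getD j.toNat 0) (v.set i.toNat ((v.getD i.toNat []).set j.toNat true))).2).2 r1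
        have e3 : searchAux g (pvMu (searchAux g (pvMu v) i (j + 1) ((g.getD i.toNat []).getD j.toNat 0) (searchAux g (pvMu v) (i + 1) j ((g.getD i.toNat []).getD j.toNat 0) (v.set i.toNat ((v.getD i.toNat []).set j.toNat true))).2).2 + 1) (i - 1) j ((g.getD i.toNat []).getD j.toNat 0) (searchAux g (pvMu v) i (j + 1) ((g.getD i.toNat []).getD j.toNat 0) (searchAux g (pvMu v) (i + 1) j ((g.getD i.toNat []).getD j.toNat 0) (v.set i.toNat ((v.getD i.toNat []).set j.toNat true))).2).2 = (searchAux g (pvMu v) (i - 1) j ((g.getD i.toNat []).getD j.toNat 0) (searchAux g (pvMu v) i (j + 1) ((g.getD i.toNat []).getD j.toNat 0) (searchAux g (pvMu v) (i + 1) j ((g.getD i.toNat []).getD j.toNat 0) (v.set i.toNat ((v.getD i.toNat []).set j.toNat true))).2).2) :=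
          searchAux_fi g (pvMu (searchAux g (pvMu v) i (j + 1) ((g.getD i.toNat []).getD j.toNat 0) (searchAux g (pvMu v) (i + 1) j ((g.getD i.toNat []).getD j.toNat 0) (v.set i.toNat ((v.getD i.toNat []).set j.toNat true))).2).2) _ _ _ _ _ _ r2 le_rfl (by omega) (by omega)
        rw [e3]
        have m3 := (searchAux_mono g (pvMu v) (i - 1) j ((g.getD i.toNat []).getD j.toNat 0) (searchAux g (pvMu v) i (j + 1) ((g.getD i.toNat []).getD j.toNat 0) (searchAux g (pvMu v) (i + 1) j ((g.getD i.toNat []).getD j.toNat 0) (v.set i.toNat ((v.getD i.toNat []).set j.toNat true))).2).2).1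
        have r3 := (searchAux_mono g (pvMu v) (i - 1) j ((g.getD i.toNat []).getD j.toNat 0) (searchAux g (pvMu v) i (j + 1) ((g.getD i.toNat []).getD j.toNat 0) (searchAux g (pvMu v) (i + 1) j ((g.getD i.toNat []).getD j.toNat 0) (v.set i.toNat ((v.getD i.toNat []).set j.toNat true))).2).2).2 r2
        have e4 : searchAux g (pvMu (searchAux g (pvMu v) (i - 1) j ((g.getD i.toNat []).getD j.toNat 0) (searchAux g (pvMu v) i (j + 1) ((g.getD i.toNat []).getD j.toNat 0) (searchAux g (pvMu v) (i + 1) j ((g.getD i.toNat []).getD j.toNat 0) (v.set i.toNat ((v.getD i.toNat []).set j.toNat true))).2).2).2 + 1) i (j - 1) ((g.getD i.toNat []).getD j.toNat 0) (searchAux g (pvMu v) (i - 1) j ((g.getD i.toNat []).getD j.toNat 0) (searchAux g (pvMu v) i (j + 1) ((g.getD i.toNat []).getD j.toNat 0) (searchAux g (pvMu v) (i + 1) j ((g.getD i.toNat []).getD j.toNat 0) (v.set i.toNat ((v.getD i.toNat []).set j.toNat true))).2).2).2 = (searchAux g (pvMu v) i (j - 1) ((g.getD i.toNat []).getD j.toNat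 0) (searchAux g (pvMu v) (i - 1) j ((g.getD i.toNat []).getD j.toNat 0) (searchAux g (pvMu v) i (j + 1) ((g.getD i.toNat []).getD j.toNat 0) (searchAux g (pvMu v) (i + 1) j ((g.getD i.toNat []).getD j.toNat 0) (v.set i.toNat ((v.getD i.toNat []).set j.toNat true))).2).2).2) :=
          searchAux_fi g (pvMu (searchAux g (pvMu v) (i - 1) j ((g.getD i.toNat []).getD j.toNat 0) (searchAux g (pvMu v) i (j + 1) ((g.getD i.toNat []).getD j.toNat 0) (searchAux g (pvMu v) (i + 1) j ((g.getD i.toNat []).getD j.toNat 0) (v.set i.toNat ((v.getD i.toNat []).set j.toNat true))).2).2).2) _ _ _ _ _ _ r3 le_rfl (by omega) (by omega)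
        rw [e4]
        show ans + ((searchAux g (pvMu v) (i + 1) j ((g.getD i.toNat []).getD j.toNat 0) (v.set i.toNat ((v.getD i.toNat []).set j.toNat true))).1 + ((searchAux g (pvMu v) i (j + 1) ((g.getD i.toNat []).getD j.toNat 0) (searchAux g (pvMu v) (i + 1) j ((g.getD i.toNat []).getD j.toNat 0) (v.set i.toNat ((v.getD i.toNat []).set j.toNat true))).2).1 + ((searchAux g (pvMu v) (i - 1) j ((g.getD i.toNat []).getD j.toNat 0) (searchAux g (pvMu v) i (j + 1) ((g.getD i.toNat []).getD j.toNat 0) (searchAux g (pvMu v) (i + 1) j ((g.getD i.toNat []).getD j.toNat 0) (v.set i.toNat ((v.getD i.toNat []).set j.toNat true))).2).2).1 + ((searchAux g (pvMu v) i (j - 1) ((g.getD i.toNat []).getD j.toNat 0) (searchAux g (pvMu v) (i - 1) j ((g.getD i.toNat []).getD j.toNat 0) (searchAux g (pvMu v) i (j + 1) ((g.getD i.toNat []).getD j.toNat 0) (searchAux g (pvMu v) (i + 1) j ((g.getD i.toNat []).getD j.toNat 0) (v.set i.toNat ((v.getD i.toNat []).set j.toNat true))).2).2).2).1 + (runA g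 s' (searchAux g (pvMu v) i (j - 1) ((g.getD i.toNat []).getD j.toNat 0) (searchAux g (pvMu v) (i - 1) j ((g.getD i.toNat []).getD j.toNat 0) (searchAux g (pvMu v) i (j + 1) ((g.getD i.toNat []).getD j.toNat 0) (searchAux g (pvMu v) (i + 1) j ((g.getD i.toNat []).getD j.toNat 0) (v.set i.toNat ((v.getD i.toNat []).set j.toNat true))).2).2).2).2).1)))) =
          ans + (((searchAux g (pvMu v) (i + 1) j ((g.getD i.toNat []).getD j.toNat 0) (v.set i.toNat ((v.getD i.toNat []).set j.toNat true))).1 + (searchAux g (pvMu v) i (j + 1) ((g.getD i.toNat []).getD j.toNat 0) (searchAux g (pvMu v) (i + 1) j ((g.getD i.toNat []).getD j.toNat 0) (v.set i.toNat ((v.getD i.toNat []).set j.toNat true))).2).1 + (searchAux g (pvMu v) (i - 1) j ((g.getD i.toNat []).getD j.toNat 0) (searchAux g (pvMu v) i (j + 1) ((g.getD i.toNat []).getD j.toNat 0) (searchAux g (pvMu v) (i + 1) j ((g.getD i.toNat []).getD j.toNat 0) (v.set i.toNat ((v.getD i.toNat []).set j.toNat true))).2).2).1 + (searchAux g (pvMu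 v) i (j - 1) ((g.getD i.toNat []).getD j.toNat 0) (searchAux g (pvMu v) (i - 1) j ((g.getD i.toNat []).getD j.toNat 0) (searchAux g (pvMu v) i (j + 1) ((g.getD i.toNat []).getD j.toNat 0) (searchAux g (pvMu v) (i + 1) j ((g.getD i.toNat []).getD j.toNat 0) (v.set i.toNat ((v.getD i.toNat []).set j.toNat true))).2).2).2).1) + (runA g s' (searchAux g (pvMu v) i (j - 1) ((g.getD i.toNat []).getD j.toNat 0) (searchAux g (pvMu v) (i - 1) j ((g.getD i.toNat []).getD j.toNat 0) (searchAux g (pvMu v) i (j + 1) ((g.getD i.toNat []).getD j.toNat 0) (searchAux g (pvMu v) (i + 1) j ((g.getD i.toNat []).getD j.toNat 0) (v.set i.toNat ((v.getD i.toNat []).set j.toNat true))).2).2).2).2).1)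
        ring

-- ===== VERDICT (by name: the statement is the Claim_ definition above) =====
theorem search_spec : Claim_equal_search := by
  intro g i j c v hdom hpre
  unfold Spec_search
  rcases hpre with hoob | hA
  · show search g i j c v = search_alt g i j c v
    unfold search search_alt
    rw [searchAux_succ, if_pos hoob, loopB_succ, if_pos hoob]
    simp [loopB]
  · have hrect : Rect g v := hA
    show search g i j c v = search_alt g i j c v
    unfold search search_alt
    rw [loopB_runA g (5 * pvMu v + 1) [(i, j, c)] v 0 hrect (by simp)]
    rw [runA_cons]
    simp [runA]
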